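-- pv_equiv track=rewrite | github.com/rupesh-wadibhasme/experiemnt- | to_log.py | _get_uniques
-- ===== SOURCE A (Python) =====
-- def _get_uniques(grouped_scalers):
--    unique_BU = set()
--    unique_cpty = set()
--    unique_primarycurr = set()
--    for i in grouped_scalers:
--        BUnit, Cpty, PrimaryCurr = i
--        unique_BU.add(BUnit)
--        unique_cpty.add(Cpty)
--        unique_primarycurr.add(PrimaryCurr)
--    return unique_BU, unique_cpty, unique_primarycurr
-- ===== SOURCE B (Python) =====
-- def _uniq_dc(items):
--     if len(items) <= 1:
--         if not items:
--             return set(), set(), set()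
--         BUnit, Cpty, PrimaryCurr = items[0]
--         return {BUnit}, {Cpty}, {PrimaryCurr}
--     mid = len(items) // 2
--     lBU, lC, lP = _uniq_dc(items[:mid])
--     rBU, rC, rP = _uniq_dc(items[mid:])
--     return lBU | rBU, lC | rC, lP | rP
--
-- def _get_uniques(grouped_scalers):
--     items = list(grouped_scalers)
--     return _uniq_dc(items)
-- ===== Notes on version B (the rewrite author's own statement) =====
-- stated objective: alternative
-- what changed: Replaces A's single left-to-right loop threading three set accumulators with a divide-and-conquer recursion that splits the list in halves, recurses, and merges the three per-position sets with set union.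
import Mathlib
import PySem

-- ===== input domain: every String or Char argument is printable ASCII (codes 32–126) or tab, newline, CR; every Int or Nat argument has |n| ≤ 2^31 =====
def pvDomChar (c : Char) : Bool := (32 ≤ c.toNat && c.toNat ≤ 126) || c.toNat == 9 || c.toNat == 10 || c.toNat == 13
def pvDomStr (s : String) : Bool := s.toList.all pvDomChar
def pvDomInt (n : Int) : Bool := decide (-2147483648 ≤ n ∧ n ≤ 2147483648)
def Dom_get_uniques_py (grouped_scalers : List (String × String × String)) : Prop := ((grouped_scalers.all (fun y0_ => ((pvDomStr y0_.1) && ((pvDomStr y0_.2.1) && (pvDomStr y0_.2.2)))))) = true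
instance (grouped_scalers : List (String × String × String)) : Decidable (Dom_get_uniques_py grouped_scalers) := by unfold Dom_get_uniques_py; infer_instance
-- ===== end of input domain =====

-- B replaces A's single loop threading three set accumulators by a divide-and-conquer recursion
-- (split in halves, recurse, merge the three per-position sets with set union); same result, different algorithm.

-- ===== PORT A =====
def get_uniques_py (grouped_scalers : List (String × String × String)) : List String × List String × List String :=
  let init : PySem.Set String × PySem.Set String × PySem.Set String :=
    (PySem.Set.empty, PySem.Set.empty, PySem.Set.empty)
  grouped_scalers.foldl
    (fun acc i =>
      (PySem.Set.add acc.1 i.1, PySem.Set.add acc.2.1 i.2.1, PySem.Set.add acc.2.2 i.2.2))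
    init

-- ===== PORT B =====
-- _uniq_dc from Source B: halve via items[:mid] / items[mid:] (PySem.List.slice), merge with | (PySem.Set.union)
def uniq_dc (items : List (String × String × String)) :
    PySem.Set String × PySem.Set String × PySem.Set String :=
  if h : items.length ≤ 1 then
    match items with
    | [] => (PySem.Set.empty, PySem.Set.empty, PySem.Set.empty)
    | i :: _ => (PySem.Set.ofList [i.1], PySem.Set.ofList [i.2.1], PySem.Set.ofList [i.2.2])
  else
    let mid : Nat := items.length / 2
    let l := uniq_dc (PySem.List.slice items none (some (mid : Int)))
    let r := uniq_dc (PySem.List.slice items (some (mid : Int)) none)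
    (PySem.Set.union l.1 r.1, PySem.Set.union l.2.1 r.2.1, PySem.Set.union l.2.2 r.2.2)
termination_by items.length
decreasing_by
  · simp only [PySem.List.slice_to_natCast, List.length_take]
    omega
  · simp only [PySem.List.slice_from_natCast, List.length_drop]
    omega

def get_uniques_py_alt (grouped_scalers : List (String × String × String)) : List String × List String × List String :=
  let items := grouped_scalers
  uniq_dc items

-- ===== PRECONDITION & SPEC =====
def Spec_get_uniques_py (grouped_scalers : List (String × String × String)) (out : List String × List String × List String) : Prop := out = get_uniques_py_alt grouped_scalers
instance (grouped_scalers : List (String × String × String)) (out : List String × List String × List String) : Decidable (Spec_get_uniques_py grouped_scalers out) := by unfold Spec_get_uniques_py; infer_instance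

-- ===== CLAIM (what is proved, stated in full; the proofs are below) =====
def Claim_equal_get_uniques_py : Prop := ∀ (grouped_scalers : List (String × String × String)), Dom_get_uniques_py grouped_scalers → Spec_get_uniques_py grouped_scalers (get_uniques_py grouped_scalers)

-- ===== LEMMAS AND PROOFS =====

theorem get_uniques_foldl_split (xs : List (String × String × String))
    (a b c : PySem.Set String) :
    xs.foldl
      (fun acc i =>
        (PySem.Set.add acc.1 i.1, PySem.Set.add acc.2.1 i.2.1, PySem.Set.add acc.2.2 i.2.2))
      (a, b, c)
    = (xs.foldl (fun s i => PySem.Set.add s i.1) a,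
       xs.foldl (fun s i => PySem.Set.add s i.2.1) b,
       xs.foldl (fun s i => PySem.Set.add s i.2.2) c) := by
  induction xs generalizing a b c with
  | nil => rfl
  | cons x xs ih => simpa using ih _ _ _

theorem ofList_map_eq_foldl {α β : Type} [BEq α] (f : β → α) (xs : List β) :
    PySem.Set.ofList (xs.map f) = xs.foldl (fun s b => PySem.Set.add s (f b)) PySem.Set.empty := by
  rw [← PySem.Set.update_nil_left, PySem.Set.update_map_eq_foldl_add]
  rfl

theorem update_ofList_right {α : Type} [BEq α] [LawfulBEq α] (s : PySem.Set α) (ys : List α) :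
    PySem.Set.update s (PySem.Set.ofList ys) = PySem.Set.update s ys := by
  rw [PySem.Set.update_eq_append_filter, PySem.Set.update_eq_append_filter,
    PySem.Set.ofList_ofList]

theorem union_ofList_ofList {α : Type} [BEq α] [LawfulBEq α] (xs ys : List α) :
    PySem.Set.union (PySem.Set.ofList xs) (PySem.Set.ofList ys)
      = PySem.Set.ofList (xs ++ ys) := by
  rw [PySem.Set.ofList_append]
  exact update_ofList_right _ _

theorem uniq_dc_eq (items : List (String × String × String)) :
    uniq_dc items
      = (PySem.Set.ofList (items.map (fun i => i.1)),
         PySem.Set.ofList (items.map (fun i => i.2.1)),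
         PySem.Set.ofList (items.map (fun i => i.2.2))) := by
  induction items using uniq_dc.induct with
  | case1 h => simp [uniq_dc]
  | case2 a rest h1 h2 =>
      have hr : rest = [] := by cases rest <;> simp_all
      subst hr
      simp [uniq_dc]
  | case3 xs h mid ihl ihr =>
      rw [uniq_dc, dif_neg h]
      simp only [PySem.List.slice_to_natCast, PySem.List.slice_from_natCast] at ihl ihr
      simp only [show (mid : Nat) = xs.length / 2 from rfl] at ihl ihr
      simp only [PySem.List.slice_to_natCast, PySem.List.slice_from_natCast, ihl, ihr,
        union_ofList_ofList, ← List.map_append, List.take_append_drop]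

-- ===== VERDICT (by name: the statement is the Claim_ definition above) =====
theorem get_uniques_py_spec : Claim_equal_get_uniques_py := by
  intro xs _
  unfold Spec_get_uniques_py get_uniques_py get_uniques_py_alt
  rw [uniq_dc_eq]
  simp only [get_uniques_foldl_split, ofList_map_eq_foldl]
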